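-- pv_equiv track=rewrite | github.com/mombasawalafaizan/dsa_solution | Stacks, Queues and Heaps/Stacks and Queues/min_sum_of_squares_removing_k_chars.py | getMinimumVal
-- ===== SOURCE A (Python) =====
-- def getMinimumVal(s: str, k: int) -> int:
--     if k >= len(s):
--         return 0
--     arr = [0] * 27
--     for ch in s:
--         arr[ord(ch)-97]+=1
--     arr.sort(reverse=True)
--     end = 0
--     while arr[end] > 0:
--         end += 1
--     j = 0
--     modify = 0
--     while modify!=k:
--         j = 1
--         while j<=end and arr[0]==arr[j]:
--             j += 1
--         reverse = j-1
--         while reverse>=0: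
--             arr[reverse] -= 1
--             modify += 1
--             if modify==k:
--                 break
--             reverse-=1
--     cnt = 0
--     for i in range(end):
--         cnt += arr[i]**2
--     return cnt
-- ===== SOURCE B (Python) =====
-- def getMinimumVal(s: str, k: int) -> int:
--     if k >= len(s):
--         return 0
--     freq = {}
--     for ch in s:
--         freq[ch] = freq.get(ch, 0) + 1
--     g = sorted(freq.values(), reverse=True)
--     rem = k
--     while rem > 0:
--         j = 1
--         while j < len(g) and g[j] == g[0]:
--             j += 1
--         nxt = g[j] if j < len(g) else 0
--         drop = g[0] - nxt
--         if j * drop <= rem: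
--             rem -= j * drop
--             for i in range(j):
--                 g[i] = nxt
--         else:
--             q, r = divmod(rem, j)
--             for i in range(j):
--                 g[i] -= q
--             for i in range(r):
--                 g[i] -= 1
--             rem = 0
--     return sum(c * c for c in g)
-- ===== Notes on version B (the rewrite author's own statement) =====
-- stated objective: alternative
-- what changed: A removes the k characters one at a time (k unit decrements of the max-frequency plateau over a 27-bucket array); B counts with a dict and levels the sorted frequency list plateau-by-plateau, absorbing k in at most 26 batches via divmod, so its batch loop does not iterate per removed character (intended as faster for large k; a timing run's measurements varied between 1.4x and 2.0x at the largest size, so no speed is claimed).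
-- outside the precondition, e.g. on getMinimumVal('Fa', 0): A returns 4, B returns 2
import Mathlib
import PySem

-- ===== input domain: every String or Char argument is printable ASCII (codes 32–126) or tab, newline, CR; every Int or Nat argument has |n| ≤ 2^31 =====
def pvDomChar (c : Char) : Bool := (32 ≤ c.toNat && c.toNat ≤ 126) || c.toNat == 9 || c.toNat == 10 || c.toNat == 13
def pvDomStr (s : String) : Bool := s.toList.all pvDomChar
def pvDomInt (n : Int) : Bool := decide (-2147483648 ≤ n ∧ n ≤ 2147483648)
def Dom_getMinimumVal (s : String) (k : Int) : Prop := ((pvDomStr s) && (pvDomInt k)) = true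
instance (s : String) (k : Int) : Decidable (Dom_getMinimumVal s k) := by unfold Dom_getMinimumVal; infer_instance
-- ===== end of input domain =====

-- B replaces A's one-character-at-a-time removal loop (one iteration per removed character) by
-- plateau-sized batches absorbed with divmod over the sorted dict-counted frequency list.

-- ===== PORT A =====
def pvChIdx (c : Char) : Int := (c.toNat : Int) - 97

def pvCountArr (l : List Char) : List Int :=
  l.foldl (fun arr c => PySem.List.pySetD arr (pvChIdx c) (PySem.List.pyGetD arr (pvChIdx c) 0 + 1))
    (List.replicate 27 0)

-- `while arr[end] > 0: end += 1` (Python raises IndexError at e = 27; Pre_ keeps e ≤ 26)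
def pvEndLoop (arr : List Int) (e : Nat) : Nat :=
  if e < 27 then
    if PySem.List.pyGetD arr (e : Int) 0 > 0 then pvEndLoop arr (e + 1) else e
  else e
termination_by 27 - e

-- `j = 1; while j <= end and arr[0] == arr[j]: j += 1`
def pvJLoopA (arr : List Int) (endd : Nat) (j : Nat) : Nat :=
  if h : j ≤ endd ∧ PySem.List.pyGetD arr 0 0 = PySem.List.pyGetD arr (j : Int) 0 then
    pvJLoopA arr endd (j + 1)
  else j
termination_by endd + 1 - j
decreasing_by omega

-- `while reverse >= 0: arr[reverse] -= 1; modify += 1; if modify == k: break; reverse -= 1`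
-- (state carried as r = k - modify, a Nat since Pre_ has 0 ≤ k)
def pvRevLoopA (arr : List Int) (rev : Nat) (r : Nat) : List Int × Nat :=
  let arr' := PySem.List.pySetD arr (rev : Int) (PySem.List.pyGetD arr (rev : Int) 0 - 1)
  let r' := r - 1
  if r' = 0 then (arr', 0)
  else match rev with
    | 0 => (arr', r')
    | Nat.succ rev' => pvRevLoopA arr' rev' r'

-- `while modify != k:` — every round removes at least one character, so fuel k suffices
def pvOuterA (fuel : Nat) (arr : List Int) (endd : Nat) (r : Nat) : List Int :=
  match fuel with
  | 0 => arr
  | Nat.succ f =>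
    if r = 0 then arr
    else
      let j := pvJLoopA arr endd 1
      let p := pvRevLoopA arr (j - 1) r
      pvOuterA f p.1 endd p.2

def getMinimumVal (s : String) (k : Int) : Int :=
  if PySem.Str.len s ≤ k then 0
  else
    let arr1 := PySem.List.sorted (pvCountArr s.toList) (fun x => x) true
    let endd := pvEndLoop arr1 0
    let arr2 := pvOuterA k.toNat arr1 endd k.toNat
    (PySem.List.pyRange 0 (endd : Int)).foldl
      (fun cnt i => cnt + (PySem.List.pyGetD arr2 i 0) ^ 2) 0

-- ===== PORT B =====
-- `j = 1; while j < len(g) and g[j] == g[0]: j += 1`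
def pvJLoopB (g : List Int) (j : Nat) : Nat :=
  if h : j < g.length ∧ PySem.List.pyGetD g (j : Int) 0 = PySem.List.pyGetD g 0 0 then
    pvJLoopB g (j + 1)
  else j
termination_by g.length - j
decreasing_by omega

-- `while rem > 0:` batch loop of Source B; each batch absorbs at least one removal, so fuel k+1 suffices
def pvLoopB (fuel : Nat) (g : List Int) (rem : Int) : List Int :=
  match fuel with
  | 0 => g
  | Nat.succ f =>
    if 0 < rem then
      let j := pvJLoopB g 1
      let nxt := if j < g.length then PySem.List.pyGetD g (j : Int) 0 else 0
      let drop := PySem.List.pyGetD g 0 0 - nxt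
      if (j : Int) * drop ≤ rem then
        pvLoopB f ((PySem.List.pyRange 0 (j : Int)).foldl
            (fun g i => PySem.List.pySetD g i nxt) g) (rem - (j : Int) * drop)
      else
        let q := PySem.Int.floordiv rem (j : Int)
        let rr := PySem.Int.mod rem (j : Int)
        let g1 := (PySem.List.pyRange 0 (j : Int)).foldl
            (fun g i => PySem.List.pySetD g i (PySem.List.pyGetD g i 0 - q)) g
        let g2 := (PySem.List.pyRange 0 rr).foldl
            (fun g i => PySem.List.pySetD g i (PySem.List.pyGetD g i 0 - 1)) g1
        pvLoopB f g2 0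
    else g

def getMinimumVal_alt (s : String) (k : Int) : Int :=
  if PySem.Str.len s ≤ k then 0
  else
    let g0 := (s.toList.foldl (fun d c => d.insert c (d.getD c 0 + 1)) PySem.Dict.empty).values
    let g1 := PySem.List.sorted g0 (fun x => x) true
    let g2 := pvLoopB (k.toNat + 1) g1 k
    g2.foldl (fun acc c => acc + c * c) 0

-- ===== PRECONDITION & SPEC =====
-- When k < len(s), Pre_ excludes negative k, on which A's `while modify != k` loop never
-- terminates, and strings with characters outside 'a'..'z' (codes 97..122), on which A raises
-- IndexError or accidentally merges the counts of distinct characters through negative-index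
-- wraparound (arr[ord(c)-97] for c < 'a'); when k >= len(s) every input is admitted.
def Pre_getMinimumVal (s : String) (k : Int) : Prop :=
  (s.toList.length : Int) ≤ k
    ∨ (0 ≤ k ∧ s.toList.all (fun c => 97 ≤ c.toNat && c.toNat ≤ 122) = true)
instance (s : String) (k : Int) : Decidable (Pre_getMinimumVal s k) := by
  unfold Pre_getMinimumVal; infer_instance

def pvWitness_getMinimumVal : String × Int := ("aab", 1)

def Spec_getMinimumVal (s : String) (k : Int) (out : Int) : Prop := out = getMinimumVal_alt s k
instance (s : String) (k : Int) (out : Int) : Decidable (Spec_getMinimumVal s k out) := by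
  unfold Spec_getMinimumVal; infer_instance

-- ===== CLAIM (what is proved, stated in full; the proofs are below) =====
def Claim_equal_getMinimumVal : Prop := ∀ (s : String) (k : Int),
  Dom_getMinimumVal s k → Pre_getMinimumVal s k → Spec_getMinimumVal s k (getMinimumVal s k)

-- ===== LEMMAS AND PROOFS =====

-- ---- abstract unit step: decrement the last element of the leading plateau ----
def pvPl (g : List Int) : Nat :=
  match g with
  | [] => 0
  | v :: t => (t.takeWhile (fun x => x == v)).length + 1

def pvStep (g : List Int) : List Int :=
  g.set (pvPl g - 1) (g.getD (pvPl g - 1) 0 - 1)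

def pvStepN (g : List Int) : Nat → List Int
  | 0 => g
  | n + 1 => pvStepN (pvStep g) n

lemma pvStepN_add (g : List Int) (a b : Nat) :
    pvStepN g (a + b) = pvStepN (pvStepN g a) b := by
  induction a generalizing g with
  | zero => simp [pvStepN]
  | succ a ih =>
    have : a + 1 + b = (a + b) + 1 := by omega
    rw [this]
    simp only [pvStepN]
    exact ih (pvStep g)

lemma pvStepN_length (g : List Int) (n : Nat) : (pvStepN g n).length = g.length := by
  induction n generalizing g with
  | zero => rfl
  | succ n ih => simp only [pvStepN]; rw [ih, pvStep, List.length_set]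

lemma pvGetDRepl (n i : Nat) (v : Int) (rest : List Int) (h : i < n) :
    (List.replicate n v ++ rest).getD i 0 = v := by
  rw [List.getD_append _ _ _ _ (by simpa using h)]
  simp [List.getD, h]

lemma pvSetLast (n : Nat) (v w : Int) (rest : List Int) :
    (List.replicate (n + 1) v ++ rest).set n w = List.replicate n v ++ w :: rest := by
  rw [List.replicate_succ', List.append_assoc, List.set_append]
  simp

lemma pvPl_canon (p : Nat) (v : Int) (u : List Int) (hp : 1 ≤ p)
    (hu : ∀ x ∈ u.head?, x ≠ v) :
    pvPl (List.replicate p v ++ u) = p := by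
  obtain ⟨p', rfl⟩ : ∃ p', p = p' + 1 := ⟨p - 1, by omega⟩
  have hrep : List.replicate (p' + 1) v ++ u = v :: (List.replicate p' v ++ u) := by
    simp [List.replicate_succ]
  rw [hrep]
  show (List.takeWhile (fun x => x == v) (List.replicate p' v ++ u)).length + 1 = p' + 1
  have htw : List.takeWhile (fun x => x == v) u = [] := by
    cases u with
    | nil => rfl
    | cons x xs =>
      have hx : (x == v) = false := by
        have : x ≠ v := hu x (by simp)
        simpa using this
      simp [hx]
  rw [List.takeWhile_append]
  simp [htw]

lemma pvStep_canon (p : Nat) (v : Int) (u : List Int) (hp : 1 ≤ p)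
    (hu : ∀ x ∈ u.head?, x ≠ v) :
    pvStep (List.replicate p v ++ u) = List.replicate (p - 1) v ++ (v - 1) :: u := by
  obtain ⟨p', rfl⟩ : ∃ p', p = p' + 1 := ⟨p - 1, by omega⟩
  rw [pvStep, pvPl_canon _ _ _ hp hu]
  have hg : (List.replicate (p' + 1) v ++ u).getD (p' + 1 - 1) 0 = v :=
    pvGetDRepl _ _ _ _ (by omega)
  rw [hg]
  have : p' + 1 - 1 = p' := by omega
  rw [this, pvSetLast]

lemma pvStepN_partial (r : Nat) : ∀ (j : Nat) (v : Int) (t : List Int), 1 ≤ j → r ≤ j →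
    (∀ x ∈ t, x ≤ v - 1) →
    pvStepN (List.replicate j v ++ t) r
      = List.replicate (j - r) v ++ List.replicate r (v - 1) ++ t := by
  induction r with
  | zero => intro j v t hj hr ht; simp [pvStepN]
  | succ r ih =>
    intro j v t hj hr ht
    have hu : ∀ x ∈ t.head?, x ≠ v := by
      intro x hx
      have : x ∈ t := by cases t <;> simp_all
      have := ht x this; omega
    show pvStepN (pvStep (List.replicate j v ++ t)) r = _
    rw [pvStep_canon _ _ _ hj hu]
    rcases Nat.eq_zero_or_pos r with hr0 | hrpos
    · subst hr0
      simp [pvStepN]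
    · have hj2 : 2 ≤ j := by omega
      have : (v - 1) :: t = List.replicate 1 (v - 1) ++ t := by simp
      have hrw : List.replicate (j - 1) v ++ (v - 1) :: t
          = List.replicate (j - 1) v ++ ((v - 1) :: t) := by simp
      rw [hrw]
      have ih' := ih (j - 1) v ((v - 1) :: t) (by omega) (by omega)
        (by intro x hx
            rcases List.mem_cons.mp hx with hx | hx
            · omega
            · exact ht x hx)
      rw [ih']
      have h1 : j - 1 - r = j - (r + 1) := by omega
      rw [h1, List.append_assoc, List.append_assoc]
      congr 1
      have : List.replicate r (v - 1) ++ (v - 1) :: t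
          = List.replicate (r + 1) (v - 1) ++ t := by
        rw [List.replicate_succ', List.append_assoc]; simp
      rw [this]

lemma pvStepN_level (d : Nat) : ∀ (j : Nat) (v : Int) (t : List Int), 1 ≤ j →
    (∀ x ∈ t, x ≤ v - d) →
    pvStepN (List.replicate j v ++ t) (j * d) = List.replicate j (v - d) ++ t := by
  induction d with
  | zero => intro j v t hj ht; simp [pvStepN]
  | succ d ih =>
    intro j v t hj ht
    have hsplit : j * (d + 1) = j + j * d := by ring
    rw [hsplit, pvStepN_add]
    have h1 : pvStepN (List.replicate j v ++ t) j
        = List.replicate j (v - 1) ++ t := by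
      have := pvStepN_partial j j v t hj (le_refl j)
        (by intro x hx; have := ht x hx; push_cast at this ⊢; omega)
      simpa using this
    rw [h1]
    have h2 := ih j (v - 1) t hj
      (by intro x hx; have := ht x hx; push_cast at this ⊢; omega)
    rw [h2]
    congr 2
    push_cast; ring

-- ---- sorted-descending decomposition into plateau ++ strictly-smaller tail ----
lemma pvDropWhileHead (p : Int → Bool) : ∀ (l : List Int) (y : Int) (t : List Int),
    l.dropWhile p = y :: t → p y = false := by
  intro l
  induction l with
  | nil => intro y t h; simp at h
  | cons a l ih =>
    intro y t h
    by_cases hp : p a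
    · rw [List.dropWhile_cons_of_pos hp] at h
      exact ih _ _ h
    · rw [List.dropWhile_cons_of_neg hp] at h
      cases h
      simpa using hp
lemma pvHeadMax (v : Int) (t : List Int)
    (h : (v :: t).Pairwise (fun a b => b ≤ a)) : ∀ x ∈ v :: t, x ≤ v := by
  intro x hx
  rcases List.mem_cons.mp hx with rfl | hx
  · exact le_refl x
  · exact (List.pairwise_cons.mp h).1 x hx

lemma pvDecomp (v : Int) (t0 : List Int)
    (hs : (v :: t0).Pairwise (fun a b => b ≤ a)) :
    v :: t0 = List.replicate (pvPl (v :: t0)) v ++ (v :: t0).drop (pvPl (v :: t0))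
      ∧ 1 ≤ pvPl (v :: t0)
      ∧ ∀ x ∈ (v :: t0).drop (pvPl (v :: t0)), x < v := by
  have hpl : pvPl (v :: t0) = (t0.takeWhile (fun x => x == v)).length + 1 := rfl
  set tw := t0.takeWhile (fun x => x == v) with htw
  set dw := t0.dropWhile (fun x => x == v) with hdw
  have hsplit : t0 = tw ++ dw := (List.takeWhile_append_dropWhile).symm
  have htwrep : tw = List.replicate tw.length v := by
    rw [List.eq_replicate_iff]
    exact ⟨rfl, fun b hb => by simpa using List.mem_takeWhile_imp hb⟩
  have hform : v :: t0 = List.replicate (tw.length + 1) v ++ dw := by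
    rw [List.replicate_succ]
    simp only [List.cons_append]
    congr 1
    rw [← htwrep]
    exact hsplit
  have hdrop : (v :: t0).drop (pvPl (v :: t0)) = dw := by
    rw [hpl, hform]
    have : List.replicate (tw.length + 1) v ++ dw
        = (List.replicate (tw.length + 1) v) ++ dw := rfl
    rw [this]
    exact List.drop_left' (by simp)
  refine ⟨by rw [hdrop, hpl]; exact hform, by omega, ?_⟩
  rw [hdrop]
  intro x hx
  have hxle : x ≤ v := by
    apply pvHeadMax v t0 hs
    exact List.mem_cons_of_mem v ((List.dropWhile_sublist _).mem hx)
  have hpt0 : t0.Pairwise (fun a b => b ≤ a) := (List.pairwise_cons.mp hs).2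
  have hpdw : dw.Pairwise (fun a b => b ≤ a) :=
    List.Pairwise.sublist (List.dropWhile_sublist _) hpt0
  cases hdwc : dw with
  | nil => rw [hdwc] at hx; simp at hx
  | cons y dw' =>
    have hdwne : dw ≠ [] := by rw [hdwc]; simp
    have hEq : List.dropWhile (fun x => x == v) t0 = y :: dw' := hdw.symm.trans hdwc
    have hy : (y == v) = false := pvDropWhileHead (fun x => x == v) t0 y dw' hEq
    have hyv : y < v := by
      have hymem : y ∈ t0 :=
        (List.dropWhile_sublist (fun x => x == v)).mem (by rw [hEq]; simp)
      have hyle : y ≤ v := pvHeadMax v t0 hs y (List.mem_cons_of_mem v hymem)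
      have : y ≠ v := by simpa using hy
      omega
    rw [hdwc] at hx
    rcases List.mem_cons.mp hx with rfl | hx'
    · exact hyv
    · have hple : x ≤ y := by
        rw [hdwc] at hpdw
        exact (List.pairwise_cons.mp hpdw).1 x hx'
      omega

-- ---- `while arr[end] > 0` scan stops exactly at the positive prefix ----
lemma pvEndLoop_eq (h : List Int) (pad : Nat) (h26 : h.length ≤ 26)
    (hpos : ∀ x ∈ h, 1 ≤ x) :
    ∀ d e, h.length - e = d → e ≤ h.length →
    pvEndLoop (h ++ List.replicate pad 0) e = h.length := by
  intro d
  induction d with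
  | zero =>
    intro e hd he
    have he' : e = h.length := by omega
    subst he'
    rw [pvEndLoop]
    have hlt : h.length < 27 := by omega
    have hget : PySem.List.pyGetD (h ++ List.replicate pad 0) (h.length : Int) 0 = 0 := by
      rw [PySem.List.pyGetD_natCast]
      rw [List.getD_eq_getElem?_getD, List.getElem?_append_right (by omega)]
      simp
    rw [hget]
    simp [hlt]
  | succ d ih =>
    intro e hd he
    have helt : e < h.length := by omega
    rw [pvEndLoop]
    have hlt : e < 27 := by omega
    have hget : PySem.List.pyGetD (h ++ List.replicate pad 0) (e : Int) 0 = h[e] := by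
      rw [PySem.List.pyGetD_natCast, List.getD_eq_getElem?_getD,
        List.getElem?_append_left (by omega)]
      simp [helt]
    have hpos' : 0 < h[e] := by
      have := hpos h[e] (List.getElem_mem _)
      omega
    rw [hget]
    simp only [hlt, if_true, hpos']
    exact ih (e + 1) (by omega) (by omega)

-- ---- A's inner plateau scan computes pvPl ----
lemma pvJLoopA_eq (p : Nat) (v : Int) (u : List Int) (endd : Nat)
    (hp : 1 ≤ p) (hpe : p ≤ endd) (hune : u ≠ []) (hu : ∀ x ∈ u.head?, x < v) :
    ∀ d j, p - j = d → 1 ≤ j → j ≤ p →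
    pvJLoopA (List.replicate p v ++ u) endd j = p := by
  have h0 : PySem.List.pyGetD (List.replicate p v ++ u) 0 0 = v := by
    rw [PySem.List.pyGetD_zero]; exact pvGetDRepl _ _ _ _ (by omega)
  intro d
  induction d with
  | zero =>
    intro j hd h1 hjp
    have hj : j = p := by omega
    subst hj
    rw [pvJLoopA, dif_neg]
    rintro ⟨-, heq⟩
    rw [h0, PySem.List.pyGetD_natCast] at heq
    cases u with
    | nil => exact hune rfl
    | cons w u' =>
      have hw : w < v := hu w (by simp)
      have : (List.replicate j v ++ w :: u').getD j 0 = w := by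
        rw [List.getD_eq_getElem?_getD, List.getElem?_append_right (by simp)]
        simp
      rw [this] at heq
      omega
  | succ d ih =>
    intro j hd h1 hjp
    have hjlt : j < p := by omega
    rw [pvJLoopA, dif_pos]
    · exact ih (j + 1) (by omega) (by omega) (by omega)
    · refine ⟨by omega, ?_⟩
      rw [h0, PySem.List.pyGetD_natCast]
      exact (pvGetDRepl _ _ _ _ hjlt).symm

-- ---- A's reverse decrement loop: c = min (rev+1) r unit steps on the plateau ----
lemma pvRevLoopA_eq (v : Int) (u : List Int) : ∀ (rev r b : Nat), 1 ≤ r →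
    pvRevLoopA (List.replicate (rev + 1) v ++ (List.replicate b (v - 1) ++ u)) rev r
      = (List.replicate (rev + 1 - min (rev + 1) r) v
          ++ (List.replicate (b + min (rev + 1) r) (v - 1) ++ u),
         r - min (rev + 1) r) := by
  intro rev
  induction rev with
  | zero =>
    intro r b hr
    rw [pvRevLoopA]
    have hget : PySem.List.pyGetD
        (List.replicate 1 v ++ (List.replicate b (v - 1) ++ u)) ((0 : Nat) : Int) 0 = v := by
      rw [PySem.List.pyGetD_natCast]
      exact pvGetDRepl _ _ _ _ (by omega)
    rw [hget, PySem.List.pySetD_natCast, pvSetLast]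
    have hmin : min (0 + 1) r = 1 := by omega
    rw [hmin]
    have harr : (List.replicate 0 v ++ ((v - 1) :: (List.replicate b (v - 1) ++ u)))
        = List.replicate (0 + 1 - 1) v ++ (List.replicate (b + 1) (v - 1) ++ u) := by
      simp [List.replicate_succ]
    split_ifs with h
    · rw [harr]
      have : r - 1 = 0 := h
      rw [this]
    · rw [harr]
  | succ rev ih =>
    intro r b hr
    rw [pvRevLoopA]
    have hget : PySem.List.pyGetD
        (List.replicate (rev + 1 + 1) v ++ (List.replicate b (v - 1) ++ u))
        ((rev + 1 : Nat) : Int) 0 = v := by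
      rw [PySem.List.pyGetD_natCast]
      exact pvGetDRepl _ _ _ _ (by omega)
    rw [hget, PySem.List.pySetD_natCast, pvSetLast]
    have harr : List.replicate (rev + 1) v ++ ((v - 1) :: (List.replicate b (v - 1) ++ u))
        = List.replicate (rev + 1) v ++ (List.replicate (b + 1) (v - 1) ++ u) := by
      simp [List.replicate_succ]
    split_ifs with hr0
    · have hr1 : r = 1 := by omega
      subst hr1
      have hmin : min (rev + 1 + 1) 1 = 1 := by omega
      rw [hmin, harr]
      have e1 : rev + 1 + 1 - 1 = rev + 1 := by omega
      rw [e1]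
    · rw [harr, ih (r - 1) (b + 1) (by omega)]
      have hm : min (rev + 1) (r - 1) + 1 = min (rev + 1 + 1) r := by omega
      have e1 : rev + 1 - min (rev + 1) (r - 1) = rev + 1 + 1 - min (rev + 1 + 1) r := by omega
      have e2 : b + 1 + min (rev + 1) (r - 1) = b + min (rev + 1 + 1) r := by omega
      have e3 : r - 1 - min (rev + 1) (r - 1) = r - min (rev + 1 + 1) r := by omega
      rw [e1, e2, e3]

lemma pvOuterA_zero (f : Nat) (arr : List Int) (e : Nat) : pvOuterA f arr e 0 = arr := by
  cases f <;> simp [pvOuterA]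

-- ---- A's outer removal loop performs r unit steps ----
lemma pvOuterA_eq : ∀ (fuel : Nat) (h : List Int) (pad r : Nat),
    r ≤ fuel → h.Pairwise (fun a b => b ≤ a) → (∀ x ∈ h, 1 ≤ x) →
    (r : Int) < h.sum → 1 ≤ pad →
    pvOuterA fuel (h ++ List.replicate pad 0) h.length r
      = pvStepN h r ++ List.replicate pad 0 := by
  intro fuel
  induction fuel with
  | zero =>
    intro h pad r hrf _ _ _ _
    have : r = 0 := by omega
    subst this
    simp [pvOuterA, pvStepN]
  | succ f ih =>
    intro h pad r hrf hsort hpos hsum hpad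
    rcases Nat.eq_zero_or_pos r with hr0 | hr1
    · subst hr0; simp [pvOuterA, pvStepN]
    cases h with
    | nil => simp at hsum; omega
    | cons v t0 =>
      obtain ⟨hform, hp1, hlt⟩ := pvDecomp v t0 hsort
      set p := pvPl (v :: t0) with hpdef
      set t := (v :: t0).drop p with htdef
      have hv1 : 1 ≤ v := hpos v (by simp)
      have hlen : (v :: t0).length = p + t.length := by
        conv_lhs => rw [hform]
        simp
      set u := t ++ List.replicate pad 0 with hudef
      have hune : u ≠ [] := by
        intro hc
        have hlu : u.length = 0 := by rw [hc]; rfl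
        rw [hudef] at hlu
        simp at hlu
        omega
      have hu : ∀ x ∈ u.head?, x < v := by
        intro x hx
        have hxm : x ∈ u := List.mem_of_mem_head? hx
        rw [hudef] at hxm
        rcases List.mem_append.mp hxm with hx1 | hx1
        · exact hlt x hx1
        · rw [List.mem_replicate] at hx1
          omega
      have harr : (v :: t0) ++ List.replicate pad 0 = List.replicate p v ++ u := by
        conv_lhs => rw [hform]
        simp [hudef]
      have hj : pvJLoopA ((v :: t0) ++ List.replicate pad 0) (v :: t0).length 1 = p := by
        rw [harr]
        exact pvJLoopA_eq p v u (v :: t0).length hp1 (by omega) hune hu (p - 1) 1 rfl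
          (by omega) hp1
      -- one round of the outer loop
      show (if r = 0 then (v :: t0) ++ List.replicate pad 0
        else
          let j := pvJLoopA ((v :: t0) ++ List.replicate pad 0) (v :: t0).length 1
          let pr := pvRevLoopA ((v :: t0) ++ List.replicate pad 0) (j - 1) r
          pvOuterA f pr.1 (v :: t0).length pr.2) = _
      rw [if_neg (by omega)]
      simp only [hj]
      have hpsucc : p - 1 + 1 = p := by omega
      have hrev := pvRevLoopA_eq v (t ++ List.replicate pad 0) (p - 1) r 0 hr1
      set c := min p r with hcdef
      have hcr : c ≤ r := by omega
      have hcp : c ≤ p := by omega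
      have harr2 : (v :: t0) ++ List.replicate pad 0
          = List.replicate (p - 1 + 1) v ++ (List.replicate 0 (v - 1) ++ (t ++ List.replicate pad 0)) := by
        rw [hpsucc, harr]
        simp [hudef]
      rw [harr2, hrev]
      simp only [hpsucc, ← hcdef]
      have hstep : pvStepN (v :: t0) c
          = List.replicate (p - c) v ++ List.replicate c (v - 1) ++ t := by
        conv_lhs => rw [hform]
        exact pvStepN_partial c p v t hp1 hcp (fun x hx => by have := hlt x hx; omega)
      have harr3 : List.replicate (p - c) v ++ (List.replicate (0 + c) (v - 1) ++ (t ++ List.replicate pad 0))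
          = pvStepN (v :: t0) c ++ List.replicate pad 0 := by
        rw [hstep]
        simp
      rw [harr3]
      rcases Nat.eq_zero_or_pos (r - c) with hrc0 | hrc1
      · have hcr' : c = r := by omega
        rw [hrc0, pvOuterA_zero, hcr']
      · have hcp' : c = p := by omega
        have hveq2 : 2 ≤ v := by
          by_contra hv2
          have hveq : v = 1 := by omega
          have htnil : t = [] := by
            cases htc : t with
            | nil => rfl
            | cons a b =>
              have ha := hlt a (by rw [htc]; simp)
              have hamem : a ∈ v :: t0 := by
                rw [hform, htc]
                exact List.mem_append_right _ (by simp)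
              have := hpos a hamem
              omega
          have hsumh : (v :: t0).sum = p := by
            conv_lhs => rw [hform, htnil]
            simp [hveq]
          rw [hsumh] at hsum
          omega
        have hstep2 : pvStepN (v :: t0) c = List.replicate p (v - 1) ++ t := by
          rw [hstep, hcp']
          simp
        have hsort' : (pvStepN (v :: t0) c).Pairwise (fun a b => b ≤ a) := by
          rw [hstep2, List.pairwise_append]
          refine ⟨List.pairwise_replicate.mpr (Or.inr le_rfl), ?_, ?_⟩
          · exact List.Pairwise.sublist (by rw [htdef]; exact List.drop_sublist _ _) hsort
          · intro a ha b hb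
            rw [List.mem_replicate] at ha
            have := hlt b hb
            omega
        have hpos' : ∀ x ∈ pvStepN (v :: t0) c, 1 ≤ x := by
          rw [hstep2]
          intro x hx
          rcases List.mem_append.mp hx with hx | hx
          · rw [List.mem_replicate] at hx
            omega
          · have hxm : x ∈ v :: t0 := by
              rw [hform]
              exact List.mem_append_right _ hx
            exact hpos x hxm
        have hsumc : (pvStepN (v :: t0) c).sum = (v :: t0).sum - p := by
          rw [hstep2]
          conv_rhs => rw [hform]
          simp [List.sum_append, List.sum_replicate]
          ring
        have hsum' : ((r - c : Nat) : Int) < (pvStepN (v :: t0) c).sum := by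
          rw [hsumc]
          have : ((r - c : Nat) : Int) = (r : Int) - c := by
            push_cast [Nat.cast_sub hcr]
            ring
          rw [this, hcp']
          omega
        have hlen' : (v :: t0).length = (pvStepN (v :: t0) c).length := by
          rw [pvStepN_length]
        rw [hlen']
        rw [ih (pvStepN (v :: t0) c) pad (r - c) (by omega) hsort' hpos' hsum' hpad]
        congr 1
        have : r = c + (r - c) := by omega
        conv_rhs => rw [this]
        rw [pvStepN_add]

-- ---- B's inner plateau scan computes pvPl ----
lemma pvJLoopB_eq (p : Nat) (v : Int) (t : List Int)
    (hp : 1 ≤ p) (hlt : ∀ x ∈ t, x < v) :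
    ∀ d j, p - j = d → 1 ≤ j → j ≤ p →
    pvJLoopB (List.replicate p v ++ t) j = p := by
  have h0 : PySem.List.pyGetD (List.replicate p v ++ t) 0 0 = v := by
    rw [PySem.List.pyGetD_zero]; exact pvGetDRepl _ _ _ _ (by omega)
  have hlength : (List.replicate p v ++ t).length = p + t.length := by simp
  intro d
  induction d with
  | zero =>
    intro j hd h1 hjp
    have hj : j = p := by omega
    subst hj
    rw [pvJLoopB, dif_neg]
    rintro ⟨hltlen, heq⟩
    rw [h0, PySem.List.pyGetD_natCast] at heq
    cases t with
    | nil => rw [hlength] at hltlen; simp at hltlen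
    | cons w t' =>
      have hw : w < v := hlt w (by simp)
      have : (List.replicate j v ++ w :: t').getD j 0 = w := by
        rw [List.getD_eq_getElem?_getD, List.getElem?_append_right (by simp)]
        simp
      rw [this] at heq
      omega
  | succ d ih =>
    intro j hd h1 hjp
    have hjlt : j < p := by omega
    rw [pvJLoopB, dif_pos]
    · exact ih (j + 1) (by omega) (by omega) (by omega)
    · refine ⟨by rw [hlength]; omega, ?_⟩
      rw [h0, PySem.List.pyGetD_natCast]
      exact pvGetDRepl _ _ _ _ hjlt

-- ---- the `for i in range(n)` write loops of Source B ----
lemma pvFoldSetConst : ∀ (n : Nat) (g : List Int) (x : Int), n ≤ g.length →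
    (PySem.List.pyRange 0 (n : Int)).foldl (fun g i => PySem.List.pySetD g i x) g
      = List.replicate n x ++ g.drop n := by
  intro n
  induction n with
  | zero => intro g x _; simp [PySem.List.pyRange]
  | succ n ih =>
    intro g x hn
    have hcast : ((n + 1 : Nat) : Int) = (n : Int) + 1 := by push_cast; ring
    rw [hcast, PySem.List.pyRange_one_succ_right (by positivity), List.foldl_append]
    rw [ih g x (by omega)]
    simp only [List.foldl_cons, List.foldl_nil]
    rw [PySem.List.pySetD_natCast]
    have hdrop : g.drop n = g[n] :: g.drop (n + 1) := List.drop_eq_getElem_cons (by omega)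
    rw [hdrop, List.set_append]
    simp only [List.length_replicate, lt_irrefl, Nat.sub_self,
      List.set_cons_zero]
    rw [List.replicate_succ', List.append_assoc]
    simp

lemma pvFoldSetSub (δ : Int) : ∀ (n : Nat) (g : List Int), n ≤ g.length →
    (PySem.List.pyRange 0 (n : Int)).foldl
      (fun g i => PySem.List.pySetD g i (PySem.List.pyGetD g i 0 - δ)) g
      = (g.take n).map (fun x => x - δ) ++ g.drop n := by
  intro n
  induction n with
  | zero => intro g _; simp [PySem.List.pyRange]
  | succ n ih =>
    intro g hn
    have hcast : ((n + 1 : Nat) : Int) = (n : Int) + 1 := by push_cast; ring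
    rw [hcast, PySem.List.pyRange_one_succ_right (by positivity), List.foldl_append]
    rw [ih g (by omega)]
    simp only [List.foldl_cons, List.foldl_nil]
    have hlenmap : ((g.take n).map (fun x => x - δ)).length = n := by
      simp
      omega
    have hdrop : g.drop n = g[n] :: g.drop (n + 1) := List.drop_eq_getElem_cons (by omega)
    have hget : PySem.List.pyGetD
        ((g.take n).map (fun x => x - δ) ++ g.drop n) ((n : Nat) : Int) 0 = g[n] := by
      rw [PySem.List.pyGetD_natCast, List.getD_eq_getElem?_getD,
        List.getElem?_append_right (by rw [hlenmap])]
      rw [hlenmap, hdrop]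
      simp [List.getElem?_eq_getElem (show n < g.length by omega)]
      rfl
    rw [hget, PySem.List.pySetD_natCast, hdrop, List.set_append]
    rw [hlenmap]
    simp only [lt_irrefl, Nat.sub_self, List.set_cons_zero]
    have htake : g.take (n + 1) = g.take n ++ [g[n]] := by
      rw [List.take_add_one, List.getElem?_eq_getElem (show n < g.length by omega)]
      simp
    rw [htake, List.map_append]
    simp

lemma pvLoopB_zero (f : Nat) (g : List Int) : pvLoopB f g 0 = g := by
  cases f <;> simp [pvLoopB]

-- ---- B's batch loop performs rem unit steps, up to a permutation ----
lemma pvLoopB_eq : ∀ (fuel : Nat) (g : List Int) (rem : Int), rem.toNat ≤ fuel →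
    g.Pairwise (fun a b => b ≤ a) → (∀ x ∈ g, 1 ≤ x) → rem < g.sum →
    (pvLoopB fuel g rem).Perm (pvStepN g rem.toNat) := by
  intro fuel
  induction fuel with
  | zero =>
    intro g rem hf _ _ _
    have : rem.toNat = 0 := by omega
    rw [this]
    exact List.Perm.refl _
  | succ f ih =>
    intro g rem hf hsort hpos hsum
    by_cases hrpos : 0 < rem
    case neg =>
      have h0 : rem.toNat = 0 := by omega
      rw [h0]
      simp only [pvLoopB]
      rw [if_neg hrpos]
      exact List.Perm.refl g
    case pos =>
    cases g with
    | nil => simp at hsum; omega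
    | cons v t0 =>
      obtain ⟨hform, hp1, hltv⟩ := pvDecomp v t0 hsort
      set p := pvPl (v :: t0) with hpdef
      set t := (v :: t0).drop p with htdef
      have hv1 : 1 ≤ v := hpos v (by simp)
      have hlen : (v :: t0).length = p + t.length := by
        conv_lhs => rw [hform]; simp
      have hj : pvJLoopB (v :: t0) 1 = p := by
        conv_lhs => rw [hform]
        exact pvJLoopB_eq p v t hp1 hltv (p - 1) 1 rfl (by omega) hp1
      have hsumg : (v :: t0).sum = (p : Int) * v + t.sum := by
        conv_lhs => rw [hform]
        simp [List.sum_append, List.sum_replicate]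
      have hpt : t.Pairwise (fun a b => b ≤ a) := by
        rw [htdef]
        exact List.Pairwise.sublist (List.drop_sublist _ _) hsort
      simp only [pvLoopB]
      rw [if_pos hrpos]
      simp only [hj]
      set nxt := (if p < (v :: t0).length
        then PySem.List.pyGetD (v :: t0) ((p : Nat) : Int) 0 else 0) with hnxtdef
      have hnxtfacts : 0 ≤ nxt ∧ nxt < v ∧ (∀ x ∈ t, x ≤ nxt)
          ∧ (t = [] → nxt = 0) ∧ (t ≠ [] → 1 ≤ nxt) := by
        rw [hnxtdef]
        cases htc : t with
        | nil =>
          rw [if_neg (by rw [hlen, htc]; simp)]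
          exact ⟨le_refl 0, by omega, by simp, fun _ => rfl, fun hc => absurd rfl hc⟩
        | cons w t' =>
          have hgetw : PySem.List.pyGetD (v :: t0) ((p : Nat) : Int) 0 = w := by
            rw [PySem.List.pyGetD_natCast]
            conv_lhs => rw [hform, htc]
            rw [List.getD_eq_getElem?_getD, List.getElem?_append_right (by simp)]
            simp
          rw [if_pos (by rw [hlen, htc]; simp), hgetw]
          have hwv : w < v := hltv w (by rw [htc]; simp)
          have hwmem : w ∈ v :: t0 := by
            rw [hform, htc]; exact List.mem_append_right _ (by simp)
          have hw1 : 1 ≤ w := hpos w hwmem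
          refine ⟨by omega, hwv, ?_, by simp, fun _ => hw1⟩
          intro x hx
          rcases List.mem_cons.mp hx with rfl | hx'
          · exact le_refl x
          · rw [htc] at hpt
            exact (List.pairwise_cons.mp hpt).1 x hx'
      obtain ⟨hnxt0, hnxtv, hnxtt, hnxtnil, hnxtne⟩ := hnxtfacts
      set dr := PySem.List.pyGetD (v :: t0) 0 0 - nxt with hdrdef
      have hget0 : PySem.List.pyGetD (v :: t0) 0 0 = v := by
        rw [PySem.List.pyGetD_zero]; simp
      have hdr : dr = v - nxt := by rw [hdrdef, hget0]
      have hdr1 : 1 ≤ dr := by omega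
      set D := dr.toNat with hDdef
      have hDcast : (D : Int) = dr := Int.toNat_of_nonneg (by omega)
      by_cases hble : (p : Int) * dr ≤ rem
      case pos =>
        rw [if_pos hble]
        -- batch levels the plateau down to nxt
        have htne : t ≠ [] := by
          intro htc
          have hn0 : nxt = 0 := hnxtnil htc
          have hs2 : (v :: t0).sum = (p : Int) * v := by rw [hsumg, htc]; simp
          have h1 : (p : Int) * dr = (p : Int) * v := by rw [hdr, hn0]; ring
          rw [hs2] at hsum
          rw [h1] at hble
          linarith
        have hnxt1 : 1 ≤ nxt := hnxtne htne
        have hfold : (PySem.List.pyRange 0 ((p : Nat) : Int)).foldl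
            (fun g i => PySem.List.pySetD g i nxt) (v :: t0)
            = List.replicate p nxt ++ t := by
          rw [pvFoldSetConst p (v :: t0) nxt (by omega)]
        rw [hfold]
        set rem' := rem - (p : Int) * dr with hrem'def
        have hrem'0 : 0 ≤ rem' := by omega
        have hlevel : pvStepN (v :: t0) (p * D) = List.replicate p nxt ++ t := by
          conv_lhs => rw [hform]
          rw [pvStepN_level D p v t hp1
            (by intro x hx; rw [hDcast, hdr]; have := hnxtt x hx; omega)]
          congr 2
          rw [hDcast, hdr]
          ring
        have hsplit : rem.toNat = p * D + rem'.toNat := by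
          have h1 : (p : Int) * dr = ((p * D : Nat) : Int) := by
            push_cast [hDcast]
            ring
          omega
        rw [hsplit, pvStepN_add, hlevel]
        -- invariants for the recursive call
        have hsort' : (List.replicate p nxt ++ t).Pairwise (fun a b => b ≤ a) := by
          rw [List.pairwise_append]
          refine ⟨List.pairwise_replicate.mpr (Or.inr le_rfl), hpt, ?_⟩
          intro a ha b hb
          rw [List.mem_replicate] at ha
          have := hnxtt b hb
          omega
        have hpos' : ∀ x ∈ List.replicate p nxt ++ t, 1 ≤ x := by
          intro x hx
          rcases List.mem_append.mp hx with hx | hx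
          · rw [List.mem_replicate] at hx; omega
          · exact hpos x (by rw [hform]; exact List.mem_append_right _ hx)
        have hsum' : rem' < (List.replicate p nxt ++ t).sum := by
          have hs3 : (List.replicate p nxt ++ t).sum = (p : Int) * nxt + t.sum := by
            simp [List.sum_append, List.sum_replicate]
          rw [hs3, hrem'def]
          have h4 : (p : Int) * dr = (p : Int) * v - (p : Int) * nxt := by rw [hdr]; ring
          rw [hsumg] at hsum
          omega
        have hfuel' : rem'.toNat ≤ f := by
          have h5 : 1 ≤ (p : Int) * dr := by
            have : (1 : Int) * 1 ≤ (p : Int) * dr := by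
              apply mul_le_mul <;> omega
            omega
          omega
        exact ih (List.replicate p nxt ++ t) rem' hfuel' hsort' hpos' hsum'
      case neg =>
        rw [if_neg hble]
        -- final partial batch via divmod
        have hplt : 0 < (p : Int) := by omega
        set q := PySem.Int.floordiv rem ((p : Nat) : Int) with hqdef
        set rr := PySem.Int.mod rem ((p : Nat) : Int) with hrrdef
        have hid : q * (p : Int) + rr = rem := PySem.Int.floordiv_mul_add_mod rem (p : Int)
        have hrr0 : 0 ≤ rr := PySem.Int.mod_nonneg rem hplt
        have hrrp : rr < (p : Int) := PySem.Int.mod_lt rem hplt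
        have hq0 : 0 ≤ q := by
          by_contra hq
          have h8 : q ≤ -1 := by omega
          nlinarith
        have hqd : q < dr := by
          rw [hqdef]
          rw [PySem.Int.floordiv_lt_iff_lt_mul hplt]
          have h9 : rem < (p : Int) * dr := by omega
          linarith
        set rr' := rr.toNat with hrr'def
        have hrrcast : (rr' : Int) = rr := Int.toNat_of_nonneg hrr0
        set Q := q.toNat with hQdef
        have hQcast : (Q : Int) = q := Int.toNat_of_nonneg hq0
        have hfold1 : (PySem.List.pyRange 0 ((p : Nat) : Int)).foldl
            (fun g i => PySem.List.pySetD g i (PySem.List.pyGetD g i 0 - q)) (v :: t0)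
            = List.replicate p (v - q) ++ t := by
          rw [pvFoldSetSub q p (v :: t0) (by omega)]
          have h1 : (v :: t0).take p = List.replicate p v := by
            conv_lhs => rw [hform]
            exact List.take_left' (by simp)
          have h2 : (v :: t0).drop p = t := htdef.symm
          rw [h1, h2, List.map_replicate]
        have hsplitrep : List.replicate p (v - q)
            = List.replicate rr' (v - q) ++ List.replicate (p - rr') (v - q) := by
          rw [← List.replicate_add]
          congr 1
          omega
        have hfold2 : (PySem.List.pyRange 0 rr).foldl
            (fun g i => PySem.List.pySetD g i (PySem.List.pyGetD g i 0 - 1))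
            (List.replicate p (v - q) ++ t)
            = List.replicate rr' (v - q - 1) ++ (List.replicate (p - rr') (v - q) ++ t) := by
          rw [← hrrcast, pvFoldSetSub 1 rr' (List.replicate p (v - q) ++ t) (by simp; omega)]
          have h1 : (List.replicate p (v - q) ++ t).take rr' = List.replicate rr' (v - q) := by
            rw [hsplitrep, List.append_assoc]
            exact List.take_left' (by simp)
          have h2 : (List.replicate p (v - q) ++ t).drop rr'
              = List.replicate (p - rr') (v - q) ++ t := by
            rw [hsplitrep, List.append_assoc]
            exact List.drop_left' (by simp)
          rw [h1, h2, List.map_replicate]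
        rw [hfold1, hfold2, pvLoopB_zero]
        -- rem = p*Q + rr' unit steps
        have hsplitn : rem.toNat = p * Q + rr' := by
          have h1 : q * (p : Int) = ((p * Q : Nat) : Int) := by
            push_cast [hQcast]
            ring
          omega
        have hlevel : pvStepN (v :: t0) (p * Q) = List.replicate p (v - q) ++ t := by
          conv_lhs => rw [hform]
          rw [pvStepN_level Q p v t hp1
            (by intro x hx
                rw [hQcast]
                have h6 := hnxtt x hx
                omega)]
          rw [hQcast]
        have hpartial : pvStepN (List.replicate p (v - q) ++ t) rr'
            = List.replicate (p - rr') (v - q) ++ List.replicate rr' (v - q - 1) ++ t :=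
          pvStepN_partial rr' p (v - q) t hp1 (by omega)
            (by intro x hx
                have h7 := hnxtt x hx
                omega)
        rw [hsplitn, pvStepN_add, hlevel, hpartial]
        -- the two blocks are written in the opposite order: a permutation
        refine List.Perm.trans ?_ (List.perm_append_comm.append_right t)
        rw [List.append_assoc]

-- ---- counting: A's 27-bucket array vs B's counter dict ----
def pvF (l : List Char) (i : Nat) : Int := (l.countP (fun c => c.toNat == 97 + i) : Int)

lemma pvCharEq (a b : Char) (h : a.toNat = b.toNat) : a = b := by
  have : a.val = b.val := UInt32.toNat_inj.mp h
  exact Char.ext this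

lemma pvCountArr_eq : ∀ l : List Char, (∀ c ∈ l, 97 ≤ c.toNat ∧ c.toNat ≤ 122) →
    pvCountArr l = (List.range 27).map (fun i => pvF l i) := by
  intro l
  induction l using List.reverseRecOn with
  | nil =>
    intro _
    refine List.ext_getElem (by simp [pvCountArr]) ?_
    intro i h1 h2
    simp [pvCountArr, pvF]
  | append_singleton l c ih =>
    intro hlc
    have hc : 97 ≤ c.toNat ∧ c.toNat ≤ 122 := hlc c (by simp)
    have hsub : ∀ c' ∈ l, 97 ≤ c'.toNat ∧ c'.toNat ≤ 122 :=
      fun c' hc' => hlc c' (by simp [hc'])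
    have hunf : pvCountArr (l ++ [c]) = PySem.List.pySetD (pvCountArr l) (pvChIdx c)
        (PySem.List.pyGetD (pvCountArr l) (pvChIdx c) 0 + 1) := by
      rw [pvCountArr, pvCountArr, List.foldl_append]
      simp
    set a := c.toNat - 97 with hadef
    have ha27 : a < 27 := by omega
    have hidx : pvChIdx c = ((a : Nat) : Int) := by
      rw [pvChIdx]
      omega
    rw [hunf, ih hsub, hidx, PySem.List.pySetD_natCast, PySem.List.pyGetD_natCast]
    have hget : ((List.range 27).map (fun i => pvF l i)).getD a 0 = pvF l a := by
      rw [List.getD_eq_getElem?_getD, List.getElem?_eq_getElem (by simp [ha27])]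
      simp [List.getElem_map]
    rw [hget]
    refine List.ext_getElem (by simp) ?_
    intro i h1 h2
    have hi27 : i < 27 := by simp at h1; omega
    rw [List.getElem_set]
    simp only [List.getElem_map, List.getElem_range]
    have hsplit : pvF (l ++ [c]) i = pvF l i + (if c.toNat == 97 + i then 1 else 0) := by
      rw [pvF, pvF, List.countP_append]
      push_cast
      simp [List.countP_cons]
    by_cases hia : a = i
    · subst hia
      have : (c.toNat == 97 + a) = true := by
        simp only [beq_iff_eq]
        omega
      rw [if_pos rfl, hsplit, this]
      simp
    · have : (c.toNat == 97 + i) = false := by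
        simp only [beq_eq_false_iff_ne]
        omega
      rw [if_neg hia, hsplit, this]
      simp

lemma pvSumF : ∀ l : List Char, (∀ c ∈ l, 97 ≤ c.toNat ∧ c.toNat ≤ 122) →
    ((List.range 27).map (fun i => pvF l i)).sum = (l.length : Int) := by
  intro l
  induction l with
  | nil => intro _; simp [pvF]
  | cons c l ih =>
    intro hlc
    have hc : 97 ≤ c.toNat ∧ c.toNat ≤ 122 := hlc c (by simp)
    have hsub : ∀ c' ∈ l, 97 ≤ c'.toNat ∧ c'.toNat ≤ 122 :=
      fun c' hc' => hlc c' (by simp [hc'])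
    have hmapeq : (List.range 27).map (fun i => pvF (c :: l) i)
        = (List.range 27).map (fun i => pvF l i
            + (if (fun i => c.toNat == 97 + i) i = true then 1 else 0)) := by
      refine List.map_congr_left ?_
      intro i _
      rw [pvF, pvF, List.countP_cons]
      push_cast
      by_cases h : (c.toNat == 97 + i) = true <;> simp [h]
    rw [hmapeq, PySem.List.sum_map_add_int, ih hsub, PySem.List.sum_map_ite_one_zero]
    have hcount : List.countP (fun i => c.toNat == 97 + i) (List.range 27) = 1 := by
      have hcg : List.countP (fun i => c.toNat == 97 + i) (List.range 27)
          = List.countP (fun i => i == c.toNat - 97) (List.range 27) := by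
        refine List.countP_congr ?_
        intro x _
        simp only [beq_iff_eq]
        omega
      rw [hcg, ← List.count_eq_countP, List.count_range]
      rw [if_pos (by omega)]
    rw [hcount]
    simp only [List.length_cons]
    push_cast
    ring

lemma pvFilterPerm (idxs : List Nat) (N : Nat) (hnd : idxs.Nodup)
    (hlt : ∀ i ∈ idxs, i < N) :
    ((List.range N).filter (fun i => decide (i ∈ idxs))).Perm idxs := by
  rw [List.perm_ext_iff_of_nodup (List.Nodup.filter _ List.nodup_range) hnd]
  intro a
  rw [List.mem_filter]
  simp only [List.mem_range, decide_eq_true_eq]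
  constructor
  · exact fun h => h.2
  · exact fun h => ⟨hlt a h, h⟩

-- ---- the multiset of A's (sorted) buckets is B's counts plus zero padding ----
lemma pvValsPerm (l : List Char) (hlc : ∀ c ∈ l, 97 ≤ c.toNat ∧ c.toNat ≤ 122) :
    ((PySem.Set.ofList l).map (fun c => (l.count c : Int))
        ++ List.replicate (27 - (PySem.Set.ofList l).length) 0).Perm
      ((List.range 27).map (fun i => pvF l i))
    ∧ (PySem.Set.ofList l).length ≤ 26 := by
  set K := PySem.Set.ofList l with hKdef
  have hKmem : ∀ c ∈ K, c ∈ l := fun c hc => (PySem.Set.mem_ofList l c).mp hc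
  have hKnd : K.Nodup := PySem.Set.nodup_ofList l
  set idxs := K.map (fun c => c.toNat - 97) with hidxdef
  have hidxnd : idxs.Nodup := by
    refine List.Nodup.map_on ?_ hKnd
    intro x hx y hy hxy
    have hx' := hlc x (hKmem x hx)
    have hy' := hlc y (hKmem y hy)
    exact pvCharEq x y (by omega)
  have hidxlt : ∀ i ∈ idxs, i < 26 := by
    intro i hi
    rw [hidxdef] at hi
    obtain ⟨c, hcK, rfl⟩ := List.mem_map.mp hi
    have := hlc c (hKmem c hcK)
    omega
  have hKlen : idxs.length = K.length := by rw [hidxdef, List.length_map]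
  have h26 : K.length ≤ 26 := by
    have hp := pvFilterPerm idxs 26 hidxnd hidxlt
    have := hp.length_eq
    have hle := List.length_filter_le (fun i => decide (i ∈ idxs)) (List.range 26)
    simp only [List.length_range] at hle
    omega
  have hP1 : ((List.range 27).filter (fun i => decide (i ∈ idxs))).Perm idxs :=
    pvFilterPerm idxs 27 hidxnd (fun i hi => by have := hidxlt i hi; omega)
  have hP0 : ((List.range 27).filter (fun i => decide (i ∈ idxs))
      ++ (List.range 27).filter (fun i => !decide (i ∈ idxs))).Perm (List.range 27) :=
    List.filter_append_perm _ _
  refine ⟨?_, h26⟩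
  -- identify the two blocks with maps of the two filters
  have he2 : idxs.map (fun i => pvF l i) = K.map (fun c => (l.count c : Int)) := by
    rw [hidxdef, List.map_map]
    refine List.map_congr_left ?_
    intro c hcK
    have hcl := hKmem c hcK
    have hcb := hlc c hcl
    simp only [Function.comp]
    rw [pvF]
    have hcg : List.countP (fun x => x.toNat == 97 + (c.toNat - 97)) l
        = List.countP (fun x => x == c) l := by
      refine List.countP_congr ?_
      intro x hxl
      simp only [beq_iff_eq]
      constructor
      · intro h; exact pvCharEq x c (by omega)
      · intro h; rw [h]; omega
    rw [hcg, ← List.count_eq_countP]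
  have hlen27 : ((List.range 27).filter (fun i => decide (i ∈ idxs))).length
      + ((List.range 27).filter (fun i => !decide (i ∈ idxs))).length = 27 := by
    have := hP0.length_eq
    simp only [List.length_append, List.length_range] at this
    omega
  have hlenP : ((List.range 27).filter (fun i => decide (i ∈ idxs))).length = K.length := by
    have := hP1.length_eq
    omega
  have he3 : ((List.range 27).filter (fun i => !decide (i ∈ idxs))).map (fun i => pvF l i)
      = List.replicate (27 - K.length) 0 := by
    rw [List.eq_replicate_iff]
    constructor
    · rw [List.length_map]
      omega
    · intro b hb
      obtain ⟨i, hifil, rfl⟩ := List.mem_map.mp hb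
      rw [List.mem_filter] at hifil
      have hnot : i ∉ idxs := by
        have := hifil.2
        simp at this
        exact this
      rw [pvF]
      have : List.countP (fun c => c.toNat == 97 + i) l = 0 := by
        rw [List.countP_eq_zero]
        intro c hcl hci
        simp only [beq_iff_eq] at hci
        have hcb := hlc c hcl
        refine hnot ?_
        rw [hidxdef]
        refine List.mem_map.mpr ⟨c, (PySem.Set.mem_ofList l c).mpr hcl, by omega⟩
      rw [this]
      rfl
  refine List.Perm.trans
    (l₂ := ((List.range 27).filter (fun i => decide (i ∈ idxs))).map (fun i => pvF l i)
      ++ ((List.range 27).filter (fun i => !decide (i ∈ idxs))).map (fun i => pvF l i)) ?_ ?_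
  · rw [← he3]
    exact List.Perm.append_right _ (by rw [← he2]; exact (hP1.map _).symm)
  · rw [← List.map_append]
    exact hP0.map _

-- ---- sorted(xs, reverse=True) is the unique nonincreasing permutation ----
lemma pvSortedRevEq (xs ys : List Int) (hperm : ys.Perm xs)
    (hpw : ys.Pairwise (fun a b => b ≤ a)) :
    PySem.List.sorted xs (fun x => x) true = ys :=
  List.Perm.eq_of_pairwise (le := fun a b : Int => b ≤ a)
    (fun a b _ _ hab hba => by omega)
    (PySem.List.sorted_pairwise_rev xs (fun x => x))
    hpw
    ((PySem.List.sorted_perm xs (fun x => x) true).trans hperm.symm)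

-- ---- the two final summations ----
lemma pvSumSq (arr : List Int) : ∀ (m : Nat) (init : Int), m ≤ arr.length →
    (PySem.List.pyRange 0 (m : Int)).foldl
      (fun cnt i => cnt + (PySem.List.pyGetD arr i 0) ^ 2) init
      = init + ((arr.take m).map (fun x => x ^ 2)).sum := by
  intro m
  induction m with
  | zero => intro init _; simp [PySem.List.pyRange]
  | succ m ih =>
    intro init hm
    have hcast : ((m + 1 : Nat) : Int) = (m : Int) + 1 := by push_cast; ring
    rw [hcast, PySem.List.pyRange_one_succ_right (by positivity), List.foldl_append]
    rw [ih init (by omega)]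
    simp only [List.foldl_cons, List.foldl_nil]
    have hget : PySem.List.pyGetD arr ((m : Nat) : Int) 0 = arr[m] := by
      rw [PySem.List.pyGetD_natCast, List.getD_eq_getElem?_getD,
        List.getElem?_eq_getElem (by omega)]
      rfl
    have htake : arr.take (m + 1) = arr.take m ++ [arr[m]] := by
      rw [List.take_add_one, List.getElem?_eq_getElem (by omega)]
      simp
    rw [hget, htake, List.map_append, List.sum_append]
    simp
    ring

lemma pvFoldSum : ∀ (g : List Int) (init : Int),
    g.foldl (fun acc c => acc + c * c) init = init + (g.map (fun c => c * c)).sum := by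
  intro g
  induction g with
  | nil => intro init; simp
  | cons a g ih =>
    intro init
    simp only [List.foldl_cons, List.map_cons, List.sum_cons]
    rw [ih]
    ring

-- ===== VERDICT (by name: the statement is the Claim_ definition above) =====
theorem getMinimumVal_spec : Claim_equal_getMinimumVal := by
  intro s k _ hpre
  unfold Spec_getMinimumVal
  simp only [getMinimumVal, getMinimumVal_alt]
  by_cases hg : PySem.Str.len s ≤ k
  · rw [if_pos hg, if_pos hg]
  · rcases hpre with hlen | ⟨hk0, hlc0⟩
    · exact absurd (by rw [PySem.Str.len_eq]; exact hlen) hg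
    rw [if_neg hg, if_neg hg]
    set l := s.toList with hldef
    have hlc : ∀ c ∈ l, 97 ≤ c.toNat ∧ c.toNat ≤ 122 := by
      intro c hc
      have := List.all_eq_true.mp hlc0 c hc
      simpa using this
    have hkl : k < (l.length : Int) := by
      rw [PySem.Str.len_eq, ← hldef] at hg
      omega
    obtain ⟨hperm, h26⟩ := pvValsPerm l hlc
    set K := PySem.Set.ofList l with hKdef
    set vals := K.map (fun c => (l.count c : Int)) with hvalsdef
    set SV := PySem.List.sorted vals (fun x => x) true with hSVdef
    have hdict : (l.foldl (fun d c => d.insert c (d.getD c 0 + 1)) PySem.Dict.empty).values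
        = vals := by
      rw [PySem.Dict.foldl_insert_getD_add_one_eq_counter,
        PySem.Dict.values_eq_map_keys _ (PySem.Dict.nodup_keys_counter l) 0,
        PySem.Dict.keys_counter]
      refine List.map_congr_left ?_
      intro c _
      rw [PySem.Dict.getD_counter]
    have hSVsort : SV.Pairwise (fun a b => b ≤ a) :=
      PySem.List.sorted_pairwise_rev vals (fun x => x)
    have hSVperm : SV.Perm vals := PySem.List.sorted_perm vals _ true
    have hSVpos : ∀ x ∈ SV, 1 ≤ x := by
      intro x hx
      have hxv : x ∈ vals := hSVperm.mem_iff.mp hx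
      obtain ⟨c, hcK, rfl⟩ := List.mem_map.mp hxv
      have hcl : c ∈ l := (PySem.Set.mem_ofList l c).mp hcK
      have := List.count_pos_iff.mpr hcl
      omega
    have hSVlen : SV.length = K.length := by
      rw [hSVdef, PySem.List.length_sorted, hvalsdef, List.length_map]
    have hSVsum : SV.sum = (l.length : Int) := by
      have h1 : SV.sum = vals.sum := hSVperm.sum_eq
      have h2 := hperm.sum_eq
      rw [List.sum_append] at h2
      have h3 := pvSumF l hlc
      have h4 : (List.replicate (27 - List.length K) (0 : Int)).sum = 0 := by simp
      omega
    have hsorted : PySem.List.sorted (pvCountArr l) (fun x => x) true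
        = SV ++ List.replicate (27 - List.length K) 0 := by
      apply pvSortedRevEq
      · rw [pvCountArr_eq l hlc]
        exact (List.Perm.append_right _ hSVperm).trans hperm
      · rw [List.pairwise_append]
        refine ⟨hSVsort, List.pairwise_replicate.mpr (Or.inr le_rfl), ?_⟩
        intro a ha b hb
        rw [List.mem_replicate] at hb
        have := hSVpos a ha
        omega
    rw [hsorted]
    have hend : pvEndLoop (SV ++ List.replicate (27 - List.length K) 0) 0 = SV.length :=
      pvEndLoop_eq SV _ (by omega) hSVpos SV.length 0 (by omega) (by omega)
    rw [hend]
    have hkNat : ((k.toNat : Nat) : Int) = k := Int.toNat_of_nonneg hk0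
    have houter := pvOuterA_eq k.toNat SV (27 - List.length K) k.toNat le_rfl hSVsort hSVpos
      (by rw [hSVsum, hkNat]; omega) (by omega)
    rw [houter]
    have hlenstep : (pvStepN SV k.toNat).length = SV.length := pvStepN_length SV k.toNat
    rw [pvSumSq (pvStepN SV k.toNat ++ List.replicate (27 - List.length K) 0) SV.length 0
      (by rw [List.length_append, hlenstep]; omega)]
    rw [List.take_left' hlenstep]
    rw [hdict, ← hSVdef, pvFoldSum]
    have hloopB : (pvLoopB (k.toNat + 1) SV k).Perm (pvStepN SV k.toNat) :=
      pvLoopB_eq (k.toNat + 1) SV k (by omega) hSVsort hSVpos (by rw [hSVsum]; omega)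
    have hsums : ((pvLoopB (k.toNat + 1) SV k).map (fun c => c * c)).sum
        = ((pvStepN SV k.toNat).map (fun c => c * c)).sum := (hloopB.map _).sum_eq
    rw [hsums]
    have hsq : (pvStepN SV k.toNat).map (fun x => x ^ 2)
        = (pvStepN SV k.toNat).map (fun c => c * c) := by
      refine List.map_congr_left ?_
      intro a _
      rw [pow_two]
    rw [hsq]
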